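-- pv_equiv track=rewrite | github.com/cole43623/numeri | prop numeri.py | is_prime_or_semiprime
-- ===== SOURCE A (Python) =====
-- def is_prime_or_semiprime(N):
--     """Restituisce True se N è primo o semi-primo."""
--     if N < 2:
--         return False
--
--     # Check if N is prime
--     def is_prime(x):
--         if x < 2:
--             return False
--         for i in range(2, int(x**0.5) + 1):
--             if x % i == 0:
--                 return False
--         return True
--
--     if is_prime(N):
--         return True
--
--     # Check if N is semi-prime
--     for i in range(2, int(N**0.5) + 1):
--         if N % i == 0:
--             if is_prime(i) and is_prime(N // i):
--                 return True
--
--     return False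
-- ===== SOURCE B (Python) =====
-- def is_prime_or_semiprime(N):
--     """Restituisce True se N è primo o semi-primo."""
--     if N < 2:
--         return False
--     n, d, count = N, 2, 0
--     while d * d <= n:
--         if n % d == 0:
--             n //= d
--             count += 1
--         else:
--             d += 1
--     if n > 1:
--         count += 1
--     return 1 <= count <= 2
-- ===== Notes on version B (the rewrite author's own statement) =====
-- stated objective: simpler
-- what changed: Instead of a primality test followed by a divisor scan with nested primality tests, B fully factors N by one trial-division loop counting prime factors with multiplicity and accepts exactly primes and semiprimes.
import Mathlib
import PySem

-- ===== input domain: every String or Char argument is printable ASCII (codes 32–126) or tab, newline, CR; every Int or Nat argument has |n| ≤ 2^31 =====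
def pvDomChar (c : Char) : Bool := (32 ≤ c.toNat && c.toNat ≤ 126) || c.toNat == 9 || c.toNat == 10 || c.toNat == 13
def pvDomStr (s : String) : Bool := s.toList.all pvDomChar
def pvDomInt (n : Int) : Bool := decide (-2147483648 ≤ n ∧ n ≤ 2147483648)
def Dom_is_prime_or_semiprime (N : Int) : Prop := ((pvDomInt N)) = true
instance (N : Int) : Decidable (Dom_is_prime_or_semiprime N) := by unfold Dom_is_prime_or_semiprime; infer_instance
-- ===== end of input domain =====

-- B replaces A's primality-test-plus-divisor-scan with a single trial-division loop counting
-- prime factors with multiplicity (objective: simpler); equivalence is proved on the stated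
-- domain |N| ≤ 2^31, on which Python's int(x**0.5) coincides with the integer square root.


-- ===== PORT A =====
-- After the `N < 2` guard every integer A manipulates is a nonnegative Python int, so the
-- port computes on N.toNat with Nat's % and / (equal to Python's % and // on nonnegatives).
-- Python's int(x**0.5) equals Nat.sqrt x for 0 ≤ x ≤ 2^31 (the stated domain), so the range
-- bound int(x**0.5) + 1 is ported as Nat.sqrt x + 1; range(2, m) is List.range' 2 (m - 2).
-- A's inner helper: `for i in range(2, int(x**0.5)+1): if x % i == 0: return False / return True`.
def aIsPrime (x : Nat) : Bool :=
  if x < 2 then false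
  else (List.range' 2 (Nat.sqrt x + 1 - 2)).all (fun i => !(x % i == 0))

def is_prime_or_semiprime (N : Int) : Bool :=
  if N < 2 then false
  else
    let n := N.toNat
    if aIsPrime n then true
    else
      -- `for i in range(2, int(N**0.5)+1): if N % i == 0: if is_prime(i) and is_prime(N//i): return True / return False`
      (List.range' 2 (Nat.sqrt n + 1 - 2)).any
        (fun i => (n % i == 0) && aIsPrime i && aIsPrime (n / i))

-- ===== PORT B =====
-- B's while loop over (n, d, count), likewise on nonnegative ints after the N < 2 guard;
-- the divisor d = k + 2 (d starts at 2 and only increments), making the termination measure explicit.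
def bGo (n k c : Nat) : Nat :=
  if (k + 2) * (k + 2) ≤ n then
    if n % (k + 2) = 0 then bGo (n / (k + 2)) k (c + 1)
    else bGo n (k + 1) c
  else if 1 < n then c + 1 else c
termination_by (n, n - k)
decreasing_by
  · exact Prod.Lex.left _ _ (Nat.div_lt_self (by
      have h4 : 2 * 2 ≤ (k + 2) * (k + 2) :=
        Nat.mul_le_mul (by omega) (by omega)
      omega) (by omega))
  · have h4 : k + 2 ≤ (k + 2) * (k + 2) := Nat.le_mul_of_pos_left _ (by omega)
    exact Prod.Lex.right _ (by omega)

def is_prime_or_semiprime_alt (N : Int) : Bool :=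
  if N < 2 then false
  else
    let c := bGo N.toNat 0 0
    decide (1 ≤ c ∧ c ≤ 2)

-- ===== PRECONDITION & SPEC =====
def Spec_is_prime_or_semiprime (N : Int) (out : Bool) : Prop := out = is_prime_or_semiprime_alt N
instance (N : Int) (out : Bool) : Decidable (Spec_is_prime_or_semiprime N out) := by unfold Spec_is_prime_or_semiprime; infer_instance

-- ===== CLAIM (what is proved, stated in full; the proofs are below) =====
def Claim_equal_is_prime_or_semiprime : Prop := ∀ (N : Int), Dom_is_prime_or_semiprime N → Spec_is_prime_or_semiprime N (is_prime_or_semiprime N)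

-- ===== LEMMAS AND PROOFS =====

-- Ω n: the number of prime factors of n with multiplicity.
def Omega (n : Nat) : Nat := n.primeFactorsList.length

-- A's trial-division helper decides primality.
theorem aIsPrime_eq (x : Nat) : aIsPrime x = decide (Nat.Prime x) := by
  rw [Bool.eq_iff_iff, decide_eq_true_iff]
  unfold aIsPrime
  by_cases hx : x < 2
  · simp only [hx, if_true, Bool.false_eq_true, false_iff]
    exact fun h => by have := h.two_le; omega
  · have hs : 1 ≤ Nat.sqrt x := Nat.sqrt_pos.2 (by omega)
    simp only [hx, if_false, List.all_eq_true]
    constructor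
    · intro h
      rw [Nat.prime_def_le_sqrt]
      refine ⟨by omega, fun m hm hms hdvd => ?_⟩
      have hmem : m ∈ List.range' 2 (Nat.sqrt x + 1 - 2) := by
        rw [List.mem_range'_1]; omega
      have := h m hmem
      simp only [Bool.not_eq_true', beq_eq_false_iff_ne, ne_eq] at this
      exact this (Nat.eq_zero_of_dvd_of_lt hdvd |> fun _ => Nat.mod_eq_zero_of_dvd hdvd)
    · intro hp i hi
      rw [List.mem_range'_1] at hi
      have hnd := (Nat.prime_def_le_sqrt.1 hp).2 i (by omega) (by omega)
      simp only [Bool.not_eq_true', beq_eq_false_iff_ne, ne_eq]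
      exact fun h0 => hnd (Nat.dvd_of_mod_eq_zero h0)

theorem Omega_eq_one_iff (n : Nat) : Omega n = 1 ↔ Nat.Prime n := by
  constructor
  · intro h
    unfold Omega at h
    obtain ⟨p, hp⟩ := List.length_eq_one_iff.1 h
    have hn0 : n ≠ 0 := by
      intro h0; subst h0; simp [Nat.primeFactorsList_zero] at hp
    have hprod := Nat.prod_primeFactorsList hn0
    rw [hp] at hprod
    simp only [List.prod_cons, List.prod_nil, mul_one] at hprod
    subst hprod
    exact Nat.prime_of_mem_primeFactorsList (n := p) (by simp [hp])
  · intro h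
    unfold Omega
    rw [Nat.primeFactorsList_prime h]
    rfl

theorem Omega_pos (n : Nat) (hn : 2 ≤ n) : 1 ≤ Omega n := by
  unfold Omega
  rcases hl : n.primeFactorsList with _ | ⟨p, l⟩
  · have := Nat.prod_primeFactorsList (show n ≠ 0 by omega)
    rw [hl] at this
    simp at this
    omega
  · simp

-- For composite n ≥ 2: Ω n = 2 iff A's semiprime scan has a witness.
theorem Omega_eq_two_iff (n : Nat) (hn : 2 ≤ n) (_hnp : ¬ Nat.Prime n) :
    Omega n = 2 ↔ ∃ i, 2 ≤ i ∧ i ≤ Nat.sqrt n ∧ i ∣ n ∧ Nat.Prime i ∧ Nat.Prime (n / i) := by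
  constructor
  · intro h
    unfold Omega at h
    obtain ⟨p, q, hpq⟩ := List.length_eq_two.1 h
    have hp : Nat.Prime p := Nat.prime_of_mem_primeFactorsList (n := n) (by simp [hpq])
    have hq : Nat.Prime q := Nat.prime_of_mem_primeFactorsList (n := n) (by simp [hpq])
    have hprod := Nat.prod_primeFactorsList (show n ≠ 0 by omega)
    rw [hpq] at hprod
    simp only [List.prod_cons, List.prod_nil, mul_one] at hprod
    rcases le_total p q with hle | hle
    · refine ⟨p, hp.two_le, ?_, ⟨q, hprod.symm⟩, hp, ?_⟩
      · rw [Nat.le_sqrt]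
        calc p * p ≤ p * q := Nat.mul_le_mul_left p hle
        _ = n := hprod
      · rw [← hprod, Nat.mul_div_cancel_left q hp.pos]
        exact hq
    · refine ⟨q, hq.two_le, ?_, ⟨p, by rw [← hprod, Nat.mul_comm]⟩, hq, ?_⟩
      · rw [Nat.le_sqrt]
        calc q * q ≤ p * q := Nat.mul_le_mul_right q hle
        _ = n := hprod
      · rw [← hprod, Nat.mul_div_cancel p hq.pos]
        exact hp
  · rintro ⟨i, h2, hsq, hdvd, hip, hqp⟩
    have heq : i * (n / i) = n := Nat.mul_div_cancel' hdvd
    have hperm := Nat.perm_primeFactorsList_mul hip.ne_zero hqp.ne_zero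
    unfold Omega
    conv_lhs => rw [← heq]
    rw [hperm.length_eq, List.length_append,
        Nat.primeFactorsList_prime hip, Nat.primeFactorsList_prime hqp]
    rfl

-- A's semiprime scan as an existential.
theorem aScan_eq (n : Nat) (hn : 2 ≤ n) :
    ((List.range' 2 (Nat.sqrt n + 1 - 2)).any
        (fun i => (n % i == 0) && aIsPrime i && aIsPrime (n / i)) = true) ↔
      ∃ i, 2 ≤ i ∧ i ≤ Nat.sqrt n ∧ i ∣ n ∧ Nat.Prime i ∧ Nat.Prime (n / i) := by
  have hs : 1 ≤ Nat.sqrt n := Nat.sqrt_pos.2 (by omega)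
  rw [List.any_eq_true]
  constructor
  · rintro ⟨i, hi, hb⟩
    rw [List.mem_range'_1] at hi
    simp only [Bool.and_eq_true, beq_iff_eq, aIsPrime_eq, decide_eq_true_iff] at hb
    exact ⟨i, by omega, by omega, Nat.dvd_of_mod_eq_zero hb.1.1, hb.1.2, hb.2⟩
  · rintro ⟨i, h2, hsq, hdvd, hip, hqp⟩
    refine ⟨i, by rw [List.mem_range'_1]; omega, ?_⟩
    simp only [Bool.and_eq_true, beq_iff_eq, aIsPrime_eq, decide_eq_true_iff]
    exact ⟨⟨Nat.mod_eq_zero_of_dvd hdvd, hip⟩, hqp⟩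

-- n has no divisor in [2, k+2)  →  its least prime factor is at least k+2.
theorem minFac_ge (n k : Nat) (hn : 2 ≤ n)
    (hinv : ∀ m, 2 ≤ m → m < k + 2 → ¬ m ∣ n) : k + 2 ≤ n.minFac := by
  by_contra h
  push Not at h
  exact hinv n.minFac (Nat.minFac_prime (by omega)).two_le h (Nat.minFac_dvd n)

-- B's loop computes Ω, given that n has no divisor in [2, k+2).
theorem bGo_eq (n k c : Nat) : 2 ≤ n →
    (∀ m, 2 ≤ m → m < k + 2 → ¬ m ∣ n) → bGo n k c = c + Omega n := by
  induction n, k, c using bGo.induct with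
  | case1 n k c hle hdvd ih =>
    intro hn hinv
    rw [bGo]
    simp only [hle, hdvd, if_pos]
    have hd2 : (k + 2) ∣ n := Nat.dvd_of_mod_eq_zero hdvd
    have hmf : n.minFac = k + 2 :=
      le_antisymm (Nat.minFac_le_of_dvd (by omega) hd2) (minFac_ge n k hn hinv)
    have hq2 : 2 ≤ n / (k + 2) := by
      have : k + 2 ≤ n / (k + 2) := (Nat.le_div_iff_mul_le (by omega)).2 hle
      omega
    have hinv' : ∀ m, 2 ≤ m → m < k + 2 → ¬ m ∣ n / (k + 2) :=
      fun m hm hlt hdm => hinv m hm hlt (hdm.trans (Nat.div_dvd_of_dvd hd2))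
    rw [ih hq2 hinv']
    have hfact : n.primeFactorsList = n.minFac :: (n / n.minFac).primeFactorsList := by
      obtain ⟨m, rfl⟩ : ∃ m, n = m + 2 := ⟨n - 2, by omega⟩
      exact Nat.primeFactorsList_add_two m
    unfold Omega
    rw [hfact, hmf, List.length_cons]
    omega
  | case2 n k c hle hndvd ih =>
    intro hn hinv
    rw [bGo]
    simp only [hle, if_true, hndvd, if_false]
    refine ih hn (fun m hm hlt hdm => ?_)
    by_cases hm2 : m < k + 2
    · exact hinv m hm hm2 hdm
    · have : m = k + 2 := by omega
      subst this
      exact hndvd (Nat.mod_eq_zero_of_dvd hdm)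
  | case3 n k c hle h1n =>
    intro hn hinv
    rw [bGo]
    simp only [hle, if_false, h1n, if_true]
    suffices h : Omega n = 1 by omega
    rw [Omega_eq_one_iff]
    by_contra hnp
    have hsq := Nat.minFac_sq_le_self (show 0 < n by omega) hnp
    have hge := minFac_ge n k hn hinv
    have : (k + 2) * (k + 2) ≤ n.minFac * n.minFac := Nat.mul_le_mul hge hge
    rw [pow_two] at hsq
    exact hle (le_trans this hsq)
  | case4 n k c hle h1n =>
    intro hn _
    exact absurd hn (by omega)

-- ===== VERDICT (by name: the statement is the Claim_ definition above) =====
theorem is_prime_or_semiprime_spec : Claim_equal_is_prime_or_semiprime := by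
  intro N _
  unfold Spec_is_prime_or_semiprime
  by_cases hlt : N < 2
  · simp [is_prime_or_semiprime, is_prime_or_semiprime_alt, hlt]
  · simp only [is_prime_or_semiprime, is_prime_or_semiprime_alt, hlt, if_false]
    have hn : 2 ≤ N.toNat := by omega
    set n := N.toNat with hdefn
    have hΩ : bGo n 0 0 = Omega n := by
      simpa using bGo_eq n 0 0 hn (fun m h1 h2 => by omega)
    rw [hΩ, Bool.eq_iff_iff]
    have h1 := Omega_pos n hn
    by_cases hp : Nat.Prime n
    · have ha : aIsPrime n = true := by rw [aIsPrime_eq]; simp [hp]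
      have hΩ1 := (Omega_eq_one_iff n).2 hp
      simp [ha, hΩ1]
    · have ha : aIsPrime n = false := by rw [aIsPrime_eq]; simp [hp]
      have h2 : Omega n ≠ 1 := fun h => hp ((Omega_eq_one_iff n).1 h)
      rw [ha]
      simp only [Bool.false_eq_true, if_false, decide_eq_true_iff]
      constructor
      · intro hsc
        have := (Omega_eq_two_iff n hn hp).2 ((aScan_eq n hn).1 hsc)
        omega
      · intro hd
        have hΩ2 : Omega n = 2 := by omega
        exact (aScan_eq n hn).2 ((Omega_eq_two_iff n hn hp).1 hΩ2)
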